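-- pv_equiv track=rewrite | github.com/Surfing-Ninja/IIT_KDSH | pathway_store.py | _find_chapter_for_position
-- ===== SOURCE A (Python) =====
-- from typing import List, Dict, Optional
--
-- def _find_chapter_for_position(
--
--     char_pos: int,
--     chapter_boundaries: List[int]
-- ) -> Optional[int]:
--     """
--     Find which chapter a character position belongs to.
--
--     Args:
--         char_pos: Character position in text
--         chapter_boundaries: List of chapter start positions
--
--     Returns:
--         Optional[int]: Chapter index (0-based) or None
--     """
--     if not chapter_boundaries:
--         return None
--
--     for i in range(len(chapter_boundaries) - 1, -1, -1):
--         if char_pos >= chapter_boundaries[i]: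
--             return i
--
--     return 0
-- ===== SOURCE B (Python) =====
-- from typing import List, Optional
--
--
-- def _find_chapter_for_position(
--     char_pos: int,
--     chapter_boundaries: List[int]
-- ) -> Optional[int]:
--     """Single forward pass keeping the last index whose boundary is <= char_pos."""
--     if not chapter_boundaries:
--         return None
--     idx = 0
--     for i, boundary in enumerate(chapter_boundaries):
--         if char_pos >= boundary:
--             idx = i
--     return idx
-- ===== Notes on version B (the rewrite author's own statement) =====
-- stated objective: alternative
-- what changed: Replaces A's backward index loop with early return (scanning range(len-1,-1,-1) with repeated indexing) by a single forward enumerate pass that keeps the last matching index in an accumulator; no indexing, no early return, same O(n) cost.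
import Mathlib
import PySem

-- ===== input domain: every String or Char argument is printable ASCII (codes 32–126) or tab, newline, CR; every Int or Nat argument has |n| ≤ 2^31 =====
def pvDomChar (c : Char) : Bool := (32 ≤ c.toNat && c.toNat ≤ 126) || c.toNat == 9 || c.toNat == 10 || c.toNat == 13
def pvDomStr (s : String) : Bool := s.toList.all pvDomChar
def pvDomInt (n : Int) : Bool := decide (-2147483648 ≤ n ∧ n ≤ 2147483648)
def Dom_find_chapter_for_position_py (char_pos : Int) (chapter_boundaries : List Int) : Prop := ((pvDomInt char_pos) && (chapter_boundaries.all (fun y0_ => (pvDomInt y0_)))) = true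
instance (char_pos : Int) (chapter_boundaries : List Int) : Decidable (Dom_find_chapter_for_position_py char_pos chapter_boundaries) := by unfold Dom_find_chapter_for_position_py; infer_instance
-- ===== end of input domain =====

-- B replaces A's backward early-return index loop by a single forward enumerate pass
-- keeping the last matching index (alternative decomposition, same O(n) cost).

-- ===== PORT A =====
-- A's loop over range(len(cb)-1, -1, -1): first index i (from the top) with char_pos >= cb[i].
-- Every i produced by the range is in bounds, so cb[i] is ported as pyGetD (exact here; Python never raises).
def pvLoopA (char_pos : Int) (cb : List Int) : List Int → Option Int
  | [] => some 0
  | i :: rest =>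
    if char_pos ≥ PySem.List.pyGetD cb i 0 then some i
    else pvLoopA char_pos cb rest

def find_chapter_for_position_py (char_pos : Int) (chapter_boundaries : List Int) : Option Int :=
  if chapter_boundaries = [] then none
  else pvLoopA char_pos chapter_boundaries
    (PySem.List.pyRange ((chapter_boundaries.length : Int) - 1) (-1) (-1))

-- ===== PORT B =====
def find_chapter_for_position_py_alt (char_pos : Int) (chapter_boundaries : List Int) : Option Int :=
  if chapter_boundaries = [] then none
  else some ((PySem.List.enumerate chapter_boundaries 0).foldl
    (fun acc p => if char_pos ≥ p.2 then p.1 else acc) 0)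

-- ===== PRECONDITION & SPEC =====
def Spec_find_chapter_for_position_py (char_pos : Int) (chapter_boundaries : List Int) (out : Option Int) : Prop := out = find_chapter_for_position_py_alt char_pos chapter_boundaries
instance (char_pos : Int) (chapter_boundaries : List Int) (out : Option Int) : Decidable (Spec_find_chapter_for_position_py char_pos chapter_boundaries out) := by unfold Spec_find_chapter_for_position_py; infer_instance

-- ===== CLAIM (what is proved, stated in full; the proofs are below) =====
def Claim_equal_find_chapter_for_position_py : Prop := ∀ (char_pos : Int) (chapter_boundaries : List Int), Dom_find_chapter_for_position_py char_pos chapter_boundaries → Spec_find_chapter_for_position_py char_pos chapter_boundaries (find_chapter_for_position_py char_pos chapter_boundaries)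

-- ===== LEMMAS AND PROOFS =====

-- Core invariant: the backward loop over [m-1, …, 0] computes the same value as the
-- forward fold over the enumerated first m elements.
theorem pvLoopA_eq_fold (char_pos : Int) (cb : List Int) (m : Nat) (hm : m ≤ cb.length) :
    pvLoopA char_pos cb (PySem.List.pyRange ((m : Int) - 1) (-1) (-1)) =
      some ((PySem.List.enumerate (cb.take m) 0).foldl
        (fun acc p => if char_pos ≥ p.2 then p.1 else acc) 0) := by
  induction m with
  | zero =>
      rw [PySem.List.pyRange_neg_one_eq_nil (by norm_num)]
      simp [pvLoopA]
  | succ m ih =>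
      have hmlt : m < cb.length := hm
      have hcons : PySem.List.pyRange (((m + 1 : Nat) : Int) - 1) (-1) (-1)
          = (m : Int) :: PySem.List.pyRange ((m : Int) - 1) (-1) (-1) := by
        have := PySem.List.pyRange_neg_one_cons (a := (m : Int)) (b := (-1 : Int)) (by omega)
        simpa using this
      have htake : cb.take (m + 1) = cb.take m ++ [cb[m]] := by
        rw [List.take_add_one]
        simp [List.getElem?_eq_getElem hmlt]
      rw [hcons]
      simp only [pvLoopA]
      have hget : PySem.List.pyGetD cb (m : Int) 0 = cb[m] := by
        rw [PySem.List.pyGetD_natCast]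
        simp [List.getD_eq_getElem?_getD, hmlt]
      rw [hget, htake, PySem.List.enumerate_append, List.foldl_append, ih (Nat.le_of_lt hmlt)]
      simp [PySem.List.enumerate]
      split_ifs <;> simp [Nat.le_of_lt hmlt]

theorem find_chapter_for_position_py_eq (char_pos : Int) (cb : List Int) :
    find_chapter_for_position_py char_pos cb = find_chapter_for_position_py_alt char_pos cb := by
  unfold find_chapter_for_position_py find_chapter_for_position_py_alt
  by_cases h : cb = []
  · simp [h]
  · simp only [h, if_false]
    have := pvLoopA_eq_fold char_pos cb cb.length (le_refl _)
    simpa using this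

-- ===== VERDICT (by name: the statement is the Claim_ definition above) =====
theorem find_chapter_for_position_py_spec : Claim_equal_find_chapter_for_position_py := by
  intro char_pos cb _
  unfold Spec_find_chapter_for_position_py
  exact find_chapter_for_position_py_eq char_pos cb
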